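-- pv_equiv track=rewrite | github.com/joachim-fr/Mini-projet-Parking | parking.py | __correct_user_value
-- ===== SOURCE A (Python) =====
-- def __correct_user_value(repartition_place: dict):
--     """Correction des entrées utilisateurs"""
--     liste_etages = []
--     liste_places = []
--
--     liste_etages_corrigee = []
--     liste_places_corrigee = []
--
--     repartition_place_corrigee = {}
--
--     for etage, places in repartition_place.items():
--         liste_etages.append(etage)
--         liste_places.append(places)
--
--     etage_reference = min(liste_etages, key=lambda e: abs(e))
--     liste_places_corrigee.append(liste_places[liste_etages.index(etage_reference)])
--     liste_places.pop(liste_etages.index(etage_reference))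
--     liste_etages.pop(liste_etages.index(etage_reference))
--     liste_etages_corrigee.append(etage_reference)
--
--     while any(etage > 0 for etage in liste_etages):
--         etage_test = min(liste_etages, key=lambda e: e if e > 0 else float('inf'))
--
--         liste_places_corrigee.append(liste_places[liste_etages.index(etage_test)])
--         liste_places.pop(liste_etages.index(etage_test))
--
--         if max(liste_etages_corrigee) - etage_test == -1:
--             liste_etages_corrigee.append(etage_test)
--             liste_etages.pop(liste_etages.index(etage_test))
--         else:
--             liste_etages_corrigee.append(max(liste_etages_corrigee) + 1)
--             liste_etages.pop(liste_etages.index(etage_test))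
--
--     while len(liste_etages) != 0:
--         etage_test = max(liste_etages)
--
--         liste_places_corrigee.insert(0, liste_places[liste_etages.index(etage_test)])
--         liste_places.pop(liste_etages.index(etage_test))
--
--         if min(liste_etages_corrigee) - etage_test == 1:
--             liste_etages_corrigee.insert(0, etage_test)
--             liste_etages.pop(liste_etages.index(etage_test))
--         else:
--             liste_etages_corrigee.insert(0, min(liste_etages_corrigee) - 1)
--             liste_etages.pop(liste_etages.index(etage_test))
--
--     for i in range(len(liste_etages_corrigee)):
--         repartition_place_corrigee[liste_etages_corrigee[i]] = liste_places_corrigee[i]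
--
--     return repartition_place_corrigee
-- ===== SOURCE B (Python) =====
-- def __correct_user_value(repartition_place: dict):
--     """Correction des entrees utilisateurs (linear renumbering around the nearest-zero floor)"""
--     items = list(repartition_place.items())
--     ref_floor, ref_places = min(items, key=lambda kv: abs(kv[0]))
--     rest = [kv for kv in items if kv[0] != ref_floor]
--     below = sorted((kv for kv in rest if kv[0] <= 0), key=lambda kv: kv[0])
--     above = sorted((kv for kv in rest if kv[0] > 0), key=lambda kv: kv[0])
--     values = [v for _, v in below] + [ref_places] + [v for _, v in above]
--     start = ref_floor - len(below)
--     return {start + i: v for i, v in enumerate(values)}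
-- ===== Notes on version B (the rewrite author's own statement) =====
-- stated objective: faster
-- what changed: A repeatedly extracts the minimum positive (then maximum remaining) floor with list.index/pop scans inside while-loops (selection-sort style); B sorts the floors once, splits at the nearest-zero reference floor, and assigns the consecutive new numbers in one linear pass.
import Mathlib
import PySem

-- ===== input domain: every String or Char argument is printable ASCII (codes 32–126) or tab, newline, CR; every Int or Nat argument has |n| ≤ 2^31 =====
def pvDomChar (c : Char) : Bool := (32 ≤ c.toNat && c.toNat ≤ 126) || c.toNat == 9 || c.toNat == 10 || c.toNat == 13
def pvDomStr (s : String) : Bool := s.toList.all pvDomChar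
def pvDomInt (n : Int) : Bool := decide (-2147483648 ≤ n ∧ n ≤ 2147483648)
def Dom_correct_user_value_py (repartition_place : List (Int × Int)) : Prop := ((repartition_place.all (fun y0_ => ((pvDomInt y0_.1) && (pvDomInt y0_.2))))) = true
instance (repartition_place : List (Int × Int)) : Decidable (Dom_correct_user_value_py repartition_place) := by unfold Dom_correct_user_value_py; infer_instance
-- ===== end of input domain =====

-- B replaces A's quadratic index/pop selection while-loops by one sort of the floors and a
-- single linear renumbering pass (same return value; objective: faster).


-- ===== PORT A =====
def pvPosLt (a b : Int) : Bool := if 0 < a then (if 0 < b then decide (a < b) else true) else false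

def pvMinPosInf (l : List Int) : Option Int :=
  l.foldl (fun acc e =>
    match acc with
    | none => some e
    | some m => if pvPosLt e m then some e else acc) none

def pvMaxD (l : List Int) : Int := (PySem.List.max? l (fun x => x)).getD 0

def pvMinD (l : List Int) : Int := (PySem.List.min? l (fun x => x)).getD 0

def pvLoop1 (etages places accE accP : List Int) : List Int × List Int × List Int × List Int :=
  if etages.any (fun e => decide (0 < e)) then
    match pvMinPosInf etages with
    | none => (etages, places, accE, accP)
    | some t =>
      match h2 : PySem.List.index? etages t with
      | none => (etages, places, accE, accP)
      | some i =>
        let accP' := accP ++ [places.getD i 0]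
        let places' := places.eraseIdx i
        let accE' := if pvMaxD accE - t = -1 then accE ++ [t] else accE ++ [pvMaxD accE + 1]
        pvLoop1 (etages.eraseIdx i) places' accE' accP'
  else (etages, places, accE, accP)
termination_by etages.length
decreasing_by
  have := PySem.List.getElem_of_index?_eq_some h2
  obtain ⟨hk, -, -⟩ := this
  simp [List.length_eraseIdx, hk]
  omega

def pvLoop2 (etages places accE accP : List Int) : List Int × List Int × List Int × List Int :=
  if etages.length ≠ 0 then
    let t := pvMaxD etages
    match h2 : PySem.List.index? etages t with
    | none => (etages, places, accE, accP)
    | some i =>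
      let accP' := places.getD i 0 :: accP
      let places' := places.eraseIdx i
      let accE' := if pvMinD accE - t = 1 then t :: accE else (pvMinD accE - 1) :: accE
      pvLoop2 (etages.eraseIdx i) places' accE' accP'
  else (etages, places, accE, accP)
termination_by etages.length
decreasing_by
  have := PySem.List.getElem_of_index?_eq_some h2
  obtain ⟨hk, -, -⟩ := this
  simp [List.length_eraseIdx, hk]
  omega

def correct_user_value_py (repartition_place : List (Int × Int)) : List (Int × Int) :=
  let liste_etages := repartition_place.map Prod.fst
  let liste_places := repartition_place.map Prod.snd
  match PySem.List.min? liste_etages (fun e => |e|) with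
  | none => []
  | some ref =>
    match PySem.List.index? liste_etages ref with
    | none => []
    | some i0 =>
      let accP0 := [liste_places.getD i0 0]
      let places0 := liste_places.eraseIdx i0
      let etages0 := liste_etages.eraseIdx i0
      let s1 := pvLoop1 etages0 places0 [ref] accP0
      let s2 := pvLoop2 s1.1 s1.2.1 s1.2.2.1 s1.2.2.2
      let accE := s2.2.2.1
      let accP := s2.2.2.2
      ((PySem.List.pyRange 0 accE.length 1).foldl
        (fun d i => d.insert (PySem.List.pyGetD accE i 0) (PySem.List.pyGetD accP i 0))
        (PySem.Dict.empty : PySem.Dict Int Int)).items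
-- ===== PORT B =====
def correct_user_value_py_alt (repartition_place : List (Int × Int)) : List (Int × Int) :=
  match PySem.List.min? repartition_place (fun kv => |kv.1|) with
  | none => []
  | some ref =>
    let rest := repartition_place.filter (fun kv => decide (kv.1 ≠ ref.1))
    let below := PySem.List.sorted (rest.filter (fun kv => decide (kv.1 ≤ 0))) (fun kv => kv.1) false
    let above := PySem.List.sorted (rest.filter (fun kv => decide (0 < kv.1))) (fun kv => kv.1) false
    let values := below.map Prod.snd ++ [ref.2] ++ above.map Prod.snd
    let start := ref.1 - below.length
    (PySem.List.enumerate values 0).map (fun iv => (start + iv.1, iv.2))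
-- ===== PRECONDITION & SPEC =====
-- the association list encodes a Python dict, so its keys are pairwise distinct (a dict cannot
-- hold duplicate keys); on the empty dict A raises ValueError (min of an empty sequence).
def Pre_correct_user_value_py (repartition_place : List (Int × Int)) : Prop :=
  repartition_place ≠ [] ∧ (repartition_place.map Prod.fst).Nodup
instance (repartition_place : List (Int × Int)) : Decidable (Pre_correct_user_value_py repartition_place) := by unfold Pre_correct_user_value_py; infer_instance

def pvWitness_correct_user_value_py : (List (Int × Int)) := [(2, 10), (-1, 5), (1, 7)]

def Spec_correct_user_value_py (repartition_place : List (Int × Int)) (out : List (Int × Int)) : Prop := out = correct_user_value_py_alt repartition_place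
instance (repartition_place : List (Int × Int)) (out : List (Int × Int)) : Decidable (Spec_correct_user_value_py repartition_place out) := by unfold Spec_correct_user_value_py; infer_instance

-- ===== CLAIM (what is proved, stated in full; the proofs are below) =====
def Claim_equal_correct_user_value_py : Prop := ∀ (repartition_place : List (Int × Int)), Dom_correct_user_value_py repartition_place → Pre_correct_user_value_py repartition_place → Spec_correct_user_value_py repartition_place (correct_user_value_py repartition_place)

-- ===== LEMMAS AND PROOFS =====
def pvChain (r : Int) (k : Nat) : List Int := (List.range (k + 1)).map (fun (j : Nat) => r + (j : Int))

theorem pvChain_snoc (r : Int) (k : Nat) : pvChain r (k + 1) = pvChain r k ++ [r + (k + 1)] := by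
  simp [pvChain, List.range_succ]

theorem pvChain_cons (r : Int) (k : Nat) : pvChain r (k + 1) = r :: pvChain (r + 1) k := by
  apply List.ext_getElem
  · simp [pvChain]
  · intro i h1 h2
    unfold pvChain
    rcases i with _ | i <;> simp <;> push_cast <;> ring

theorem pvChain_mem {r y : Int} {k : Nat} (h : y ∈ pvChain r k) : r ≤ y ∧ y ≤ r + k := by
  simp [pvChain] at h
  obtain ⟨j, hj, rfl⟩ := h
  omega

theorem pvChain_nodup (r : Int) (k : Nat) : (pvChain r k).Nodup := by
  unfold pvChain
  refine List.Nodup.map ?_ List.nodup_range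
  intro a b hab
  simpa using hab

theorem pvChain_zero (r : Int) : pvChain r 0 = [r] := by simp [pvChain]

theorem pvChain_length (r : Int) (k : Nat) : (pvChain r k).length = k + 1 := by simp [pvChain]

theorem pvChain_exists_cons (r : Int) (k : Nat) : ∃ t, pvChain r k = r :: t := by
  cases k with
  | zero => exact ⟨[], by simp [pvChain]⟩
  | succ k => exact ⟨_, pvChain_cons r k⟩

theorem pvMaxD_cons_append (x : Int) (t : List Int) (y : Int) :
    pvMaxD ((x :: t) ++ [y]) = max (pvMaxD (x :: t)) y := by
  simp [pvMaxD, PySem.List.max?_id_cons, List.foldl_append]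

theorem pvMaxD_chain (r : Int) (k : Nat) : pvMaxD (pvChain r k) = r + k := by
  induction k with
  | zero => simp [pvChain, pvMaxD, PySem.List.max?_id_cons]
  | succ k ih =>
    obtain ⟨t, ht⟩ := pvChain_exists_cons r k
    rw [pvChain_snoc, ht, pvMaxD_cons_append, ← ht, ih]
    push_cast; omega

theorem foldl_min_of_le (a : Int) (t : List Int) (h : ∀ y ∈ t, a ≤ y) : t.foldl min a = a := by
  induction t with
  | nil => rfl
  | cons y t ih =>
    simp only [List.foldl_cons, min_eq_left (h y (by simp))]
    exact ih (fun z hz => h z (by simp [hz]))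

theorem pvMinD_chain (r : Int) (k : Nat) : pvMinD (pvChain r k) = r := by
  obtain ⟨t, ht⟩ := pvChain_exists_cons r k
  have hmem : ∀ y ∈ t, r ≤ y := by
    intro y hy
    exact (pvChain_mem (r := r) (k := k) (by rw [ht]; simp [hy])).1
  simp [pvMinD, ht, PySem.List.min?_id_cons, foldl_min_of_le _ _ hmem]

theorem pvChain_pyGetD (r : Int) (k : Nat) (j : Int) (h0 : 0 ≤ j) (h1 : j < (k : Int) + 1) :
    PySem.List.pyGetD (pvChain r k) j 0 = r + j := by
  rw [PySem.List.pyGetD_eq_getElem _ _ h0 (by rw [pvChain_length]; omega)]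
  simp only [pvChain]
  rw [List.getElem_map, List.getElem_range]
  omega

theorem pvMinPosInf_foldl_pos (l : List Int) (m : Int) (hm : 0 < m) :
    ∃ t, l.foldl (fun acc e =>
      match acc with
      | none => some e
      | some m => if pvPosLt e m then some e else acc) (some m) = some t ∧
      0 < t ∧ (t = m ∨ t ∈ l) ∧ t ≤ m ∧ ∀ e ∈ l, 0 < e → t ≤ e := by
  induction l generalizing m with
  | nil => exact ⟨m, rfl, hm, Or.inl rfl, le_refl m, by simp⟩
  | cons e l ih =>
    by_cases he : pvPosLt e m = true
    · have hepos : 0 < e := by by_contra h; simp [pvPosLt, h] at he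
      obtain ⟨t, h1, h2, h3, h4, h5⟩ := ih e hepos
      have hem : e ≤ m := by
        simp [pvPosLt, hepos, hm] at he
        omega
      refine ⟨t, by simpa [he] using h1, h2, ?_, le_trans h4 hem, ?_⟩
      · rcases h3 with h | h
        · exact Or.inr (by simp [h])
        · exact Or.inr (by simp [h])
      · intro x hx hxpos
        rcases List.mem_cons.mp hx with rfl | hx
        · exact h4
        · exact h5 x hx hxpos
    · obtain ⟨t, h1, h2, h3, h4, h5⟩ := ih m hm
      have hme : 0 < e → m ≤ e := by
        intro hepos
        simp [pvPosLt, hepos, hm] at he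
        omega
      refine ⟨t, by simpa [he] using h1, h2, ?_, h4, ?_⟩
      · rcases h3 with h | h
        · exact Or.inl h
        · exact Or.inr (by simp [h])
      · intro x hx hxpos
        rcases List.mem_cons.mp hx with rfl | hx
        · exact le_trans h4 (hme hxpos)
        · exact h5 x hx hxpos

theorem pvMinPosInf_foldl_nonpos (l : List Int) (m : Int) (hm : ¬ 0 < m)
    (hany : l.any (fun e => decide (0 < e)) = true) :
    ∃ t, l.foldl (fun acc e =>
      match acc with
      | none => some e
      | some m => if pvPosLt e m then some e else acc) (some m) = some t ∧
      0 < t ∧ t ∈ l ∧ ∀ e ∈ l, 0 < e → t ≤ e := by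
  induction l generalizing m with
  | nil => simp at hany
  | cons e l ih =>
    by_cases hepos : 0 < e
    · have he : pvPosLt e m = true := by simp [pvPosLt, hepos, hm]
      obtain ⟨t, h1, h2, h3, h4, h5⟩ := pvMinPosInf_foldl_pos l e hepos
      refine ⟨t, by simpa [he] using h1, h2, ?_, ?_⟩
      · rcases h3 with h | h
        · exact by simp [h]
        · exact by simp [h]
      · intro x hx hxpos
        rcases List.mem_cons.mp hx with rfl | hx
        · exact h4
        · exact h5 x hx hxpos
    · have he : pvPosLt e m = false := by simp [pvPosLt, hepos]
      have hany' : l.any (fun e => decide (0 < e)) = true := by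
        simp only [List.any_cons] at hany
        rcases Bool.or_eq_true_iff.mp hany with h | h
        · exact absurd (by simpa using h) hepos
        · exact h
      obtain ⟨t, h1, h2, h3, h4⟩ := ih m hm hany'
      refine ⟨t, by simpa [he] using h1, h2, by simp [h3], ?_⟩
      intro x hx hxpos
      rcases List.mem_cons.mp hx with rfl | hx
      · exact absurd hxpos hepos
      · exact h4 x hx hxpos

theorem pvMinPosInf_spec (l : List Int) (hany : l.any (fun e => decide (0 < e)) = true) :
    ∃ t, pvMinPosInf l = some t ∧ 0 < t ∧ t ∈ l ∧ ∀ e ∈ l, 0 < e → t ≤ e := by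
  cases l with
  | nil => simp at hany
  | cons e l =>
    unfold pvMinPosInf
    simp only [List.foldl_cons]
    by_cases hepos : 0 < e
    · obtain ⟨t, h1, h2, h3, h4, h5⟩ := pvMinPosInf_foldl_pos l e hepos
      exact ⟨t, h1, h2, by rcases h3 with h | h <;> simp [h], fun x hx hxpos => by
        rcases List.mem_cons.mp hx with rfl | hx
        · exact h4
        · exact h5 x hx hxpos⟩
    · have hany' : l.any (fun e => decide (0 < e)) = true := by
        simp only [List.any_cons] at hany
        rcases Bool.or_eq_true_iff.mp hany with h | h
        · exact absurd (by simpa using h) hepos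
        · exact h
      obtain ⟨t, h1, h2, h3, h4⟩ := pvMinPosInf_foldl_nonpos l e hepos hany'
      exact ⟨t, h1, h2, by simp [h3], fun x hx hxpos => by
        rcases List.mem_cons.mp hx with rfl | hx
        · exact absurd hxpos hepos
        · exact h4 x hx hxpos⟩

theorem pvSorted_pairwise_lt (l : List (Int × Int)) (hnd : (l.map Prod.fst).Nodup) :
    (PySem.List.sorted l (fun p => p.1) false).Pairwise (fun a b => a.1 < b.1) := by
  have hperm : (PySem.List.sorted l (fun p => p.1) false).Perm l := PySem.List.sorted_perm l _ false
  have hle := PySem.List.sorted_pairwise (xs := l) (key := fun p => p.1)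
  have hnd' : ((PySem.List.sorted l (fun p => p.1) false).map Prod.fst).Nodup :=
    ((hperm.map Prod.fst).nodup_iff).mpr hnd
  have hne := List.pairwise_map.mp hnd'
  exact (hle.and hne).imp (fun h => lt_of_le_of_ne h.1 h.2)

theorem pvMidNodup (A B : List (Int × Int)) (t v : Int)
    (hnd : ((A ++ (t, v) :: B).map Prod.fst).Nodup) :
    t ∉ (A ++ B).map Prod.fst ∧ ((A ++ B).map Prod.fst).Nodup := by
  have hp : (((t, v) :: (A ++ B)).map Prod.fst).Nodup := by
    refine ((List.Perm.map Prod.fst ?_).nodup_iff).mpr hnd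
    exact List.perm_middle.symm
  simpa [List.nodup_cons] using hp

theorem pvSorted_middle_min (A B : List (Int × Int)) (t v : Int)
    (hnd : ((A ++ (t, v) :: B).map Prod.fst).Nodup)
    (hmin : ∀ p ∈ A ++ B, t ≤ p.1) :
    PySem.List.sorted (A ++ (t, v) :: B) (fun p => p.1) false =
      (t, v) :: PySem.List.sorted (A ++ B) (fun p => p.1) false := by
  obtain ⟨htnot, hndAB⟩ := pvMidNodup A B t v hnd
  refine PySem.List.sorted_eq_of_perm_of_pairwise_lt _ _ (fun p : Int × Int => p.1) ?_ ?_
  · exact ((PySem.List.sorted_perm (A ++ B) (fun p => p.1) false).cons (t, v)).trans List.perm_middle.symm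
  · refine List.pairwise_cons.mpr ⟨?_, pvSorted_pairwise_lt _ hndAB⟩
    intro p hp
    have hp' : p ∈ A ++ B := ((PySem.List.sorted_perm (A ++ B) (fun p => p.1) false).mem_iff).mp hp
    refine lt_of_le_of_ne (hmin p hp') ?_
    intro ht
    simp only at ht
    exact htnot (by rw [ht]; exact List.mem_map_of_mem hp')

theorem pvSorted_append_max (A B : List (Int × Int)) (t v : Int)
    (hnd : ((A ++ (t, v) :: B).map Prod.fst).Nodup)
    (hmax : ∀ p ∈ A ++ B, p.1 ≤ t) :
    PySem.List.sorted (A ++ (t, v) :: B) (fun p => p.1) false =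
      PySem.List.sorted (A ++ B) (fun p => p.1) false ++ [(t, v)] := by
  obtain ⟨htnot, hndAB⟩ := pvMidNodup A B t v hnd
  refine PySem.List.sorted_eq_of_perm_of_pairwise_lt _ _ (fun p : Int × Int => p.1) ?_ ?_
  · exact (((PySem.List.sorted_perm (A ++ B) (fun p => p.1) false).append (List.Perm.refl _)).trans
      (List.perm_append_singleton _ _)).trans List.perm_middle.symm
  · refine List.pairwise_append.mpr ⟨pvSorted_pairwise_lt _ hndAB, List.pairwise_singleton _ _, ?_⟩
    intro p hp q hq
    have hp' : p ∈ A ++ B := ((PySem.List.sorted_perm (A ++ B) (fun p => p.1) false).mem_iff).mp hp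
    rcases List.mem_singleton.mp hq with rfl
    refine lt_of_le_of_ne (hmax p hp') ?_
    intro ht
    simp only at ht
    exact htnot (by rw [← ht]; exact List.mem_map_of_mem hp')

theorem pvFilterMidF {α : Type} (q : α → Bool) (A B : List α) (x : α) (hx : q x = false) :
    (A ++ x :: B).filter q = A.filter q ++ B.filter q := by
  simp [List.filter_append, List.filter_cons, hx]

theorem pvFilterMidT {α : Type} (q : α → Bool) (A B : List α) (x : α) (hx : q x = true) :
    (A ++ x :: B).filter q = A.filter q ++ x :: B.filter q := by
  simp [List.filter_append, List.filter_cons, hx]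

theorem pvLoop1_spec (P : List (Int × Int)) (r : Int) (k : Nat) (accP : List Int)
    (hnd : (P.map Prod.fst).Nodup) :
    pvLoop1 (P.map Prod.fst) (P.map Prod.snd) (pvChain r k) accP =
      ((P.filter (fun p => decide (p.1 ≤ 0))).map Prod.fst,
       (P.filter (fun p => decide (p.1 ≤ 0))).map Prod.snd,
       pvChain r (k + (P.filter (fun p => decide (0 < p.1))).length),
       accP ++ (PySem.List.sorted (P.filter (fun p => decide (0 < p.1))) (fun p => p.1) false).map Prod.snd) := by
  induction hn : P.length using Nat.strong_induction_on generalizing P k accP with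
  | _ n ih =>
  subst hn
  rw [pvLoop1]
  by_cases hany : (P.map Prod.fst).any (fun e => decide (0 < e)) = true
  · obtain ⟨t, hmin, htpos, htmem, htle⟩ := pvMinPosInf_spec _ hany
    obtain ⟨i, hi⟩ := Option.isSome_iff_exists.mp ((PySem.List.index?_isSome_iff _ _).mpr htmem)
    obtain ⟨hilt, hgetI, -⟩ := PySem.List.getElem_of_index?_eq_some hi
    have hiP : i < P.length := by simpa using hilt
    have hfst : P[i].1 = t := by simpa using hgetI
    have hPi : P[i] = (t, P[i].2) := Prod.ext hfst rfl
    have ht0 : ¬ t ≤ 0 := not_le.mpr htpos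
    -- decomposition
    have hdecomp : P = P.take i ++ P[i] :: P.drop (i + 1) := by
      conv_lhs => rw [← List.take_append_drop i P, List.drop_eq_getElem_cons hiP]
    have herase : P.eraseIdx i = P.take i ++ P.drop (i + 1) :=
      List.eraseIdx_eq_take_drop_succ P i
    have hndE : ((P.eraseIdx i).map Prod.fst).Nodup := by
      rw [← List.eraseIdx_map]
      exact hnd.sublist (List.eraseIdx_sublist _ i)
    -- filters
    have hxF : (fun p : Int × Int => decide (p.1 ≤ 0)) P[i] = false := by
      simp only [decide_eq_false_iff_not]; omega
    have hxT : (fun p : Int × Int => decide (0 < p.1)) P[i] = true := by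
      simp only [decide_eq_true_eq]; omega
    have hfilter_le : (P.eraseIdx i).filter (fun p => decide (p.1 ≤ 0)) =
        P.filter (fun p => decide (p.1 ≤ 0)) := by
      rw [herase, List.filter_append]
      conv_rhs => rw [hdecomp]
      rw [pvFilterMidF (fun p : Int × Int => decide (p.1 ≤ 0)) (P.take i) (P.drop (i + 1)) P[i] hxF]
    have hfilter_pos : P.filter (fun p => decide (0 < p.1)) =
        (P.take i).filter (fun p => decide (0 < p.1)) ++
          P[i] :: (P.drop (i + 1)).filter (fun p => decide (0 < p.1)) := by
      conv_lhs => rw [hdecomp]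
      rw [pvFilterMidT (fun p : Int × Int => decide (0 < p.1)) (P.take i) (P.drop (i + 1)) P[i] hxT]
    have hfilter_pos' : (P.eraseIdx i).filter (fun p => decide (0 < p.1)) =
        (P.take i).filter (fun p => decide (0 < p.1)) ++ (P.drop (i + 1)).filter (fun p => decide (0 < p.1)) := by
      rw [herase, List.filter_append]
    -- sorted decomposition
    have hndpos : ((P.filter (fun p => decide (0 < p.1))).map Prod.fst).Nodup :=
      hnd.sublist (List.Sublist.map Prod.fst List.filter_sublist)
    have hsorted : PySem.List.sorted (P.filter (fun p => decide (0 < p.1))) (fun p => p.1) false =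
        P[i] :: PySem.List.sorted ((P.eraseIdx i).filter (fun p => decide (0 < p.1))) (fun p => p.1) false := by
      rw [hfilter_pos', hfilter_pos]
      have hnd2 := hfilter_pos ▸ hndpos
      rw [hPi] at hnd2 ⊢
      refine pvSorted_middle_min _ _ _ _ hnd2 ?_
      intro p hp
      have hpmem : p ∈ P := by
        rw [hdecomp]
        rcases List.mem_append.mp hp with h | h
        · exact List.mem_append.mpr (Or.inl (List.mem_of_mem_filter h))
        · exact List.mem_append.mpr (Or.inr (List.mem_cons_of_mem _ (List.mem_of_mem_filter h)))
      have hppos : 0 < p.1 := by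
        rcases List.mem_append.mp hp with h | h <;> simpa using List.of_mem_filter h
      exact htle p.1 (List.mem_map_of_mem hpmem) hppos
    -- ih
    have hlen : (P.eraseIdx i).length < P.length := by
      rw [List.length_eraseIdx_of_lt hiP]; omega
    have hrec := ih (P.eraseIdx i).length (by omega) (P.eraseIdx i) (k + 1)
      (accP ++ [P[i].2]) hndE rfl
    have haccE : (if pvMaxD (pvChain r k) - t = -1 then pvChain r k ++ [t]
        else pvChain r k ++ [pvMaxD (pvChain r k) + 1]) = pvChain r (k + 1) := by
      rw [pvMaxD_chain]
      split_ifs with h <;> rw [pvChain_snoc] <;> simp <;> push_cast <;> omega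
    have hgetD : (P.map Prod.snd).getD i 0 = P[i].2 := by
      rw [List.getD_eq_getElem _ _ (by simpa using hiP)]
      simp
    simp only [hany, if_true, hmin]
    split
    · next heq => rw [hi] at heq; cases heq
    · next i' heq =>
      rw [hi] at heq
      injection heq with heq'
      subst heq'
      rw [List.eraseIdx_map, List.eraseIdx_map, hgetD, haccE, hrec]
      rw [hfilter_le, hsorted]
      have hlenf : (List.filter (fun p => decide (0 < p.1)) P).length
          = ((P.eraseIdx i).filter (fun p => decide (0 < p.1))).length + 1 := by
        rw [hfilter_pos, hfilter_pos']
        simp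
        omega
      rw [hlenf]
      have hchain : k + 1 + ((P.eraseIdx i).filter (fun p => decide (0 < p.1))).length
          = k + (((P.eraseIdx i).filter (fun p => decide (0 < p.1))).length + 1) := by omega
      rw [hchain]
      simp [List.append_assoc]
  · simp only [hany]
    have hpos_nil : P.filter (fun p => decide (0 < p.1)) = [] := by
      rw [List.filter_eq_nil_iff]
      intro p hp
      simp only [List.any_eq_true, not_exists, not_and] at hany
      simpa using hany p.1 (List.mem_map_of_mem hp)
    have hle_all : P.filter (fun p => decide (p.1 ≤ 0)) = P := by
      rw [List.filter_eq_self]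
      intro p hp
      simp only [List.any_eq_true, not_exists, not_and] at hany
      have h2 := hany p.1 (List.mem_map_of_mem hp)
      simp at h2 ⊢
      omega
    simp [hpos_nil, hle_all, PySem.List.sorted]

theorem pvLoop2_spec (P : List (Int × Int)) (r : Int) (k : Nat) (accP : List Int)
    (hnd : (P.map Prod.fst).Nodup) :
    pvLoop2 (P.map Prod.fst) (P.map Prod.snd) (pvChain r k) accP =
      ([], [], pvChain (r - P.length) (k + P.length),
       (PySem.List.sorted P (fun p => p.1) false).map Prod.snd ++ accP) := by
  induction hn : P.length using Nat.strong_induction_on generalizing P r k accP with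
  | _ n ih =>
  subst hn
  rw [pvLoop2]
  by_cases hP : P = []
  · subst hP
    simp [PySem.List.sorted]
  · have hlen0 : (P.map Prod.fst).length ≠ 0 := by simpa using fun h => hP (List.eq_nil_of_length_eq_zero h)
    obtain ⟨m, hm⟩ : ∃ m, PySem.List.max? (P.map Prod.fst) (fun x => x) = some m := by
      cases hmx : PySem.List.max? (P.map Prod.fst) (fun x => x) with
      | none =>
        exact absurd (by simpa using (PySem.List.max?_eq_none_iff _ _).mp hmx) hP
      | some m => exact ⟨m, rfl⟩
    have hmaxD : pvMaxD (P.map Prod.fst) = m := by simp [pvMaxD, hm]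
    have htmem : m ∈ P.map Prod.fst := PySem.List.max?_mem hm
    have htle : ∀ e ∈ P.map Prod.fst, e ≤ m := PySem.List.max?_isMax hm
    obtain ⟨i, hi⟩ := Option.isSome_iff_exists.mp ((PySem.List.index?_isSome_iff _ _).mpr htmem)
    obtain ⟨hilt, hgetI, -⟩ := PySem.List.getElem_of_index?_eq_some hi
    have hiP : i < P.length := by simpa using hilt
    have hfst : P[i].1 = m := by simpa using hgetI
    have hdecomp : P = P.take i ++ P[i] :: P.drop (i + 1) := by
      conv_lhs => rw [← List.take_append_drop i P, List.drop_eq_getElem_cons hiP]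
    have herase : P.eraseIdx i = P.take i ++ P.drop (i + 1) :=
      List.eraseIdx_eq_take_drop_succ P i
    have hndE : ((P.eraseIdx i).map Prod.fst).Nodup := by
      rw [← List.eraseIdx_map]
      exact hnd.sublist (List.eraseIdx_sublist _ i)
    have hsorted : PySem.List.sorted P (fun p => p.1) false =
        PySem.List.sorted (P.eraseIdx i) (fun p => p.1) false ++ [P[i]] := by
      rw [herase]
      conv_lhs => rw [hdecomp]
      have hnd2 : ((P.take i ++ P[i] :: P.drop (i + 1)).map Prod.fst).Nodup := by
        rw [← hdecomp]; exact hnd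
      rw [(Prod.ext hfst rfl : P[i] = (m, P[i].2))] at hnd2 ⊢
      refine pvSorted_append_max _ _ _ _ hnd2 ?_
      intro p hp
      have hpmem : p ∈ P := by
        rw [hdecomp]
        rcases List.mem_append.mp hp with h | h
        · exact List.mem_append.mpr (Or.inl h)
        · exact List.mem_append.mpr (Or.inr (List.mem_cons_of_mem _ h))
      exact htle p.1 (List.mem_map_of_mem hpmem)
    have hlen : (P.eraseIdx i).length < P.length := by
      rw [List.length_eraseIdx_of_lt hiP]; omega
    have hrec := ih (P.eraseIdx i).length (by omega) (P.eraseIdx i) (r - 1) (k + 1)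
      (P[i].2 :: accP) hndE rfl
    have haccE : (if pvMinD (pvChain r k) - m = 1 then m :: pvChain r k
        else (pvMinD (pvChain r k) - 1) :: pvChain r k) = pvChain (r - 1) (k + 1) := by
      rw [pvMinD_chain]
      have hc : pvChain (r - 1) (k + 1) = (r - 1) :: pvChain r k := by
        rw [pvChain_cons]
        simp
      split_ifs with h
      · rw [hc]
        congr 1
        omega
      · rw [hc]
    have hgetD : (P.map Prod.snd).getD i 0 = P[i].2 := by
      rw [List.getD_eq_getElem _ _ (by simpa using hiP)]
      simp
    simp only [hlen0, ne_eq, not_false_iff, if_true, hmaxD]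
    split
    · next heq => rw [hmaxD, hi] at heq; cases heq
    · next i' heq =>
      rw [hmaxD, hi] at heq
      injection heq with heq'
      subst heq'
      rw [List.eraseIdx_map, List.eraseIdx_map, hgetD, haccE, hrec, hsorted]
      have hchain : pvChain (r - 1 - ((P.eraseIdx i).length : Int)) (k + 1 + (P.eraseIdx i).length) =
          pvChain (r - (P.length : Int)) (k + P.length) := by
        congr 1
        · rw [List.length_eraseIdx_of_lt hiP]; push_cast; omega
        · rw [List.length_eraseIdx_of_lt hiP]; omega
      rw [hchain]
      simp [List.append_assoc]

theorem pvMin?_map {α β κ : Type} [LT κ] [DecidableLT κ] (f : α → β) (l : List α) (key : β → κ) :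
    PySem.List.min? (l.map f) key = Option.map f (PySem.List.min? l (fun a => key (f a))) := by
  show List.foldl _ none (l.map f) = _
  rw [List.foldl_map]
  suffices h : ∀ acc : Option α,
      List.foldl (fun acc x =>
        match acc with
        | none => some (f x)
        | some m => if key (f x) < key m then some (f x) else some m) (Option.map f acc) l =
      Option.map f (List.foldl (fun acc x =>
        match acc with
        | none => some x
        | some m => if key (f x) < key (f m) then some x else some m) acc l) by
    exact h none
  intro acc
  induction l generalizing acc with
  | nil => rfl
  | cons x l ih =>
    cases acc with
    | none => exact ih (some x)
    | some m =>
      simp only [List.foldl_cons, Option.map_some]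
      by_cases h : key (f x) < key (f m)
      · simp only [h, if_pos]
        exact ih (some x)
      · simp only [h, if_neg, not_false_iff]
        exact ih (some m)

theorem pvKeyUnique {P : List (Int × Int)} (hnd : (P.map Prod.fst).Nodup) {p q : Int × Int}
    (hp : p ∈ P) (hq : q ∈ P) (h : p.1 = q.1) : p = q := by
  by_contra hne
  have hpw : P.Pairwise (fun a b => a.1 ≠ b.1) := List.pairwise_map.mp hnd
  exact (hpw.forall (fun a b hab => hab.symm) hp hq hne) h

theorem pvMain (rp : List (Int × Int)) (hne : rp ≠ []) (hnd : (rp.map Prod.fst).Nodup) :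
    correct_user_value_py rp = correct_user_value_py_alt rp := by
  obtain ⟨refp, hb⟩ : ∃ p, PySem.List.min? rp (fun kv => |kv.1|) = some p := by
    cases h : PySem.List.min? rp (fun kv => |kv.1|) with
    | none => exact absurd ((PySem.List.min?_eq_none_iff _ _).mp h) hne
    | some p => exact ⟨p, rfl⟩
  have ha : PySem.List.min? (rp.map Prod.fst) (fun e => |e|) = some refp.1 := by
    rw [pvMin?_map Prod.fst rp (fun e => |e|), hb]; rfl
  have hmem : refp ∈ rp := PySem.List.min?_mem hb
  obtain ⟨i0, hi0⟩ := Option.isSome_iff_exists.mp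
    ((PySem.List.index?_isSome_iff _ _).mpr (List.mem_map_of_mem (f := Prod.fst) hmem))
  obtain ⟨hilt, hget, -⟩ := PySem.List.getElem_of_index?_eq_some hi0
  have hi0P : i0 < rp.length := by simpa using hilt
  have hPi0 : rp[i0] = refp := pvKeyUnique hnd (List.getElem_mem _) hmem (by simpa using hget)
  unfold correct_user_value_py correct_user_value_py_alt
  simp only [ha, hb, hi0]
  rw [List.eraseIdx_map, List.eraseIdx_map]
  have hgetD : (rp.map Prod.snd).getD i0 0 = refp.2 := by
    rw [List.getD_eq_getElem _ _ (by simpa using hi0P)]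
    simp [hPi0]
  rw [hgetD, show [refp.1] = pvChain refp.1 0 from (pvChain_zero _).symm]
  have hndP0 : ((rp.eraseIdx i0).map Prod.fst).Nodup := by
    rw [← List.eraseIdx_map]
    exact hnd.sublist (List.eraseIdx_sublist _ i0)
  rw [pvLoop1_spec (rp.eraseIdx i0) refp.1 0 [refp.2] hndP0]
  simp only
  have hndneg : (((rp.eraseIdx i0).filter (fun p => decide (p.1 ≤ 0))).map Prod.fst).Nodup :=
    hndP0.sublist (List.Sublist.map _ List.filter_sublist)
  rw [pvLoop2_spec ((rp.eraseIdx i0).filter (fun p => decide (p.1 ≤ 0))) refp.1 _ _ hndneg]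
  simp only
  -- rest = rp.eraseIdx i0
  have hdecomp : rp = rp.take i0 ++ refp :: rp.drop (i0 + 1) := by
    conv_lhs => rw [← List.take_append_drop i0 rp, List.drop_eq_getElem_cons hi0P, hPi0]
  have herase : rp.eraseIdx i0 = rp.take i0 ++ rp.drop (i0 + 1) :=
    List.eraseIdx_eq_take_drop_succ rp i0
  have hrest : rp.filter (fun kv => decide (kv.1 ≠ refp.1)) = rp.eraseIdx i0 := by
    obtain ⟨hnotin, -⟩ := pvMidNodup (rp.take i0) (rp.drop (i0 + 1)) refp.1 refp.2
      (by rw [show ((refp.1, refp.2) : Int × Int) = refp from rfl, ← hdecomp]; exact hnd)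
    conv_lhs => rw [hdecomp]
    rw [pvFilterMidF (fun kv : Int × Int => decide (kv.1 ≠ refp.1)) _ _ refp (by simp)]
    rw [herase]
    congr 1 <;>
      · rw [List.filter_eq_self]
        intro p hp
        simp only [decide_eq_true_eq]
        intro hp1
        exact hnotin (by rw [← hp1]; exact List.mem_map_of_mem (by simp [hp]))
  rw [hrest]
  simp only [List.append_assoc, PySem.List.length_sorted]
  set N := rp.eraseIdx i0
  set neg := N.filter (fun p => decide (p.1 ≤ 0)) with hnegdef
  set pos := N.filter (fun p => decide (0 < p.1)) with hposdef
  set V := (PySem.List.sorted neg (fun p => p.1) false).map Prod.snd ++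
      ([refp.2] ++ (PySem.List.sorted pos (fun p => p.1) false).map Prod.snd) with hV
  set E := pvChain (refp.1 - (neg.length : Int)) (0 + pos.length + neg.length) with hE
  have hfold := PySem.Dict.items_foldl_insert_fresh
    (PySem.List.pyRange 0 (E.length : Int) 1)
    (fun i => PySem.List.pyGetD E i 0) (fun i => PySem.List.pyGetD V i 0)
    PySem.Dict.empty (fun a _ => rfl)
    (by rw [show ((E.length : Int)) = PySem.List.len E from rfl, PySem.List.map_pyGetD_pyRange_zero]
        rw [hE]; exact pvChain_nodup _ _)
  rw [hfold, PySem.List.enumerate_eq_map_pyRange _ 0, List.map_map]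
  have hlenEV : PySem.List.len V = (E.length : Int) := by
    rw [hE, pvChain_length]
    simp [PySem.List.len, hV, PySem.List.length_sorted]
    push_cast
    omega
  rw [hlenEV]
  have e0 : PySem.Dict.empty.items = ([] : List (Int × Int)) := rfl
  rw [e0, List.nil_append]
  refine List.map_congr_left ?_
  intro j hj
  rw [PySem.List.mem_pyRange_one] at hj
  have hjlt : j < ((0 + pos.length + neg.length : Nat) : Int) + 1 := by
    rcases hj with ⟨h0, h1⟩
    rw [hE, pvChain_length] at h1
    push_cast at h1 ⊢
    omega
  simp only [Function.comp, hE]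
  rw [pvChain_pyGetD _ _ _ hj.1 hjlt]

-- ===== VERDICT (by name: the statement is the Claim_ definition above) =====
theorem correct_user_value_py_spec : Claim_equal_correct_user_value_py := by
  intro rp _ hpre
  exact pvMain rp hpre.1 hpre.2
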